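-- pv_equiv track=rewrite | github.com/eriosgamer/NPM-Stream-Maker | Client/port_file_reader.py | expand_instances_per_range
-- ===== SOURCE A (Python) =====
-- def expand_instances_per_range(ranges, max_instances=5, use_alternative_ranges=True):
--     """
--     Given a list of ranges [(start, end)], expands up to max_instances consecutive blocks.
--     If use_alternative_ranges is True, also generates alternative blocks for repeated ports.
--     Returns a set of expanded ports.
--     """
--     ports = set()
--     used = set()
--     for start, end in ranges:
--         range_len = end - start + 1
--         for i in range(max_instances):
--             block_start = start + i * range_len
--             block_end = block_start + range_len - 1
--             block = set(range(block_start, block_end + 1))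
--             # Avoid overlaps
--             if not block & used:
--                 ports.update(block)
--                 used.update(block)
--     # If alternative ranges are needed (simulate ws_server repeated port logic)
--     if use_alternative_ranges:
--         # For each range, add alternative incoming ports for repeated outgoing ports
--         for start, end in ranges:
--             range_len = end - start + 1
--             # For each port in the range, simulate alternative incoming ports
--             for i in range(max_instances):
--                 for offset in range(range_len):
--                     alt_incoming = start + i * range_len + offset
--                     ports.add(alt_incoming)
--     return ports
-- ===== SOURCE B (Python) =====
-- def expand_instances_per_range(ranges, max_instances=5, use_alternative_ranges=True):
--     # Interval-arithmetic overlap test on a merged-run interval list + closed-form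
--     # range union, instead of element-set block intersections and nested offset loops.
--     elems = []       # accepted ports, in insertion order (duplicate-free by construction)
--     intervals = []   # accepted blocks as (lo, hi) runs, adjacent runs merged
--     for start, end in ranges:
--         range_len = end - start + 1
--         if range_len > 0:
--             for i in range(max_instances):
--                 lo = start + i * range_len
--                 hi = lo + range_len - 1
--                 if not any(max(lo, a) <= min(hi, b) for a, b in intervals):
--                     if intervals and intervals[-1][1] == lo - 1:
--                         intervals[-1] = (intervals[-1][0], hi)
--                     else:
--                         intervals.append((lo, hi))
--                     elems.extend(range(lo, hi + 1))
--     result = set(elems)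
--     if use_alternative_ranges:
--         n = max(max_instances, 0)
--         for start, end in ranges:
--             result.update(range(start, start + n * (end - start + 1)))
--     return result
-- ===== Notes on version B (the rewrite author's own statement) =====
-- stated objective: alternative
-- what changed: Replaces A's materialized per-block element sets and set-intersection overlap test with a merged-run interval list checked by pure arithmetic (max(lo,a)<=min(hi,b)), and A's nested i/offset alternative-port loops with one closed-form range(start, start+max_instances*range_len) union per range.
import Mathlib
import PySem

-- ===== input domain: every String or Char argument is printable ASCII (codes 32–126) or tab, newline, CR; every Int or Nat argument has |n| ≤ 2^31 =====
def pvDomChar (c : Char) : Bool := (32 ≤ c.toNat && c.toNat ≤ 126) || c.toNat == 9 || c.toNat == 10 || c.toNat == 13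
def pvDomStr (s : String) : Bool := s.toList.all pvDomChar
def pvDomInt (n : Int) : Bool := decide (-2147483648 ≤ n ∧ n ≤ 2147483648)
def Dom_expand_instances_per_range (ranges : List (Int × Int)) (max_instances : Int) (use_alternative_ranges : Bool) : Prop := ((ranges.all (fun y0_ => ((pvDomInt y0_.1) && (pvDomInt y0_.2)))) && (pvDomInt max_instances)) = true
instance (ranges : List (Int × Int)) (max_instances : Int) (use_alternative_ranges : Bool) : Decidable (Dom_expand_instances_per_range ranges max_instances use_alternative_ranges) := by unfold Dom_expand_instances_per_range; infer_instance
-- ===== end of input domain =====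

-- B replaces A's materialized per-block element sets (and their set-intersection overlap
-- test) by a merged-run interval list checked arithmetically, and A's nested i/offset
-- alternative-port loops by one closed-form range union per range (objective: alternative;
-- same return value).

-- ===== PORT A =====
-- first loop of A: builds (ports, used) by adding each block unless it intersects `used`
def pvA_loop1 (max_instances : Int) (ranges : List (Int × Int))
    (pu : PySem.Set Int × PySem.Set Int) : PySem.Set Int × PySem.Set Int :=
  ranges.foldl (fun pu r =>
    let range_len := r.2 - r.1 + 1
    (PySem.List.pyRange 0 max_instances 1).foldl (fun pu i =>
      let block_start := r.1 + i * range_len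
      let block_end := block_start + range_len - 1
      let block : PySem.Set Int := PySem.Set.ofList (PySem.List.pyRange block_start (block_end + 1) 1)
      if PySem.Set.inter block pu.2 = ([] : List Int) then
        (PySem.Set.update pu.1 block, PySem.Set.update pu.2 block)
      else pu) pu) pu

-- second loop of A: ports.add(start + i*range_len + offset) for all i, offset
def pvA_loop2 (max_instances : Int) (ranges : List (Int × Int)) (ports : PySem.Set Int) : PySem.Set Int :=
  ranges.foldl (fun ports r =>
    let range_len := r.2 - r.1 + 1
    (PySem.List.pyRange 0 max_instances 1).foldl (fun ports i =>
      (PySem.List.pyRange 0 range_len 1).foldl (fun ports offset =>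
        PySem.Set.add ports (r.1 + i * range_len + offset)) ports) ports) ports

def expand_instances_per_range (ranges : List (Int × Int)) (max_instances : Int) (use_alternative_ranges : Bool) : List Int :=
  let pu := pvA_loop1 max_instances ranges (PySem.Set.empty, PySem.Set.empty)
  if use_alternative_ranges then pvA_loop2 max_instances ranges pu.1 else pu.1

-- ===== PORT B =====
-- first loop of B: accepted ports (duplicate-free by construction) + accepted intervals kept
-- as merged runs, overlap tested arithmetically against the interval list
def pvB_loop1 (max_instances : Int) (ranges : List (Int × Int))
    (st : List Int × List (Int × Int)) : List Int × List (Int × Int) :=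
  ranges.foldl (fun st r =>
    let range_len := r.2 - r.1 + 1
    if 0 < range_len then
      (PySem.List.pyRange 0 max_instances 1).foldl (fun st i =>
        let lo := r.1 + i * range_len
        let hi := lo + range_len - 1
        if st.2.any (fun ab => max lo ab.1 ≤ min hi ab.2) then st
        else
          match st.2.getLast? with
          | some ab =>
            if ab.2 = lo - 1 then
              (st.1 ++ PySem.List.pyRange lo (hi + 1) 1, st.2.dropLast ++ [(ab.1, hi)])
            else (st.1 ++ PySem.List.pyRange lo (hi + 1) 1, st.2 ++ [(lo, hi)])
          | none => (st.1 ++ PySem.List.pyRange lo (hi + 1) 1, st.2 ++ [(lo, hi)])) st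
    else st) st

-- second loop of B: one closed-form range union per range
def pvB_loop2 (max_instances : Int) (ranges : List (Int × Int)) (result : PySem.Set Int) : PySem.Set Int :=
  ranges.foldl (fun result r =>
    PySem.Set.update result
      (PySem.List.pyRange r.1 (r.1 + max max_instances 0 * (r.2 - r.1 + 1)) 1)) result

def expand_instances_per_range_alt (ranges : List (Int × Int)) (max_instances : Int) (use_alternative_ranges : Bool) : List Int :=
  let st := pvB_loop1 max_instances ranges ([], [])
  let result : PySem.Set Int := PySem.Set.ofList st.1
  if use_alternative_ranges then pvB_loop2 max_instances ranges result else result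

-- ===== PRECONDITION & SPEC =====
def Spec_expand_instances_per_range (ranges : List (Int × Int)) (max_instances : Int) (use_alternative_ranges : Bool) (out : List Int) : Prop := out = expand_instances_per_range_alt ranges max_instances use_alternative_ranges
instance (ranges : List (Int × Int)) (max_instances : Int) (use_alternative_ranges : Bool) (out : List Int) : Decidable (Spec_expand_instances_per_range ranges max_instances use_alternative_ranges out) := by unfold Spec_expand_instances_per_range; infer_instance

-- ===== CLAIM (what is proved, stated in full; the proofs are below) =====
def Claim_equal_expand_instances_per_range : Prop := ∀ (ranges : List (Int × Int)) (max_instances : Int) (use_alternative_ranges : Bool), Dom_expand_instances_per_range ranges max_instances use_alternative_ranges → Spec_expand_instances_per_range ranges max_instances use_alternative_ranges (expand_instances_per_range ranges max_instances use_alternative_ranges)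

-- ===== LEMMAS AND PROOFS =====

theorem pv_foldl_id {α β : Type} (f : α → β → α) (h : ∀ a b, f a b = a) :
    ∀ (l : List β) (a : α), l.foldl f a = a := by
  intro l
  induction l with
  | nil => intro a; rfl
  | cons b l ih => intro a; simp only [List.foldl_cons, h, ih]

theorem pv_map_shift (c L : Int) :
    (PySem.List.pyRange 0 L 1).map (fun k => c + k) = PySem.List.pyRange c (c + L) 1 := by
  rw [PySem.List.pyRange_one 0 L, PySem.List.pyRange_one c (c + L)]
  simp only [List.map_map]
  have h : c + L - c = L - 0 := by ring
  rw [h]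
  exact List.map_congr_left (fun k _ => by simp [Function.comp])

theorem pv_inner2 (start L i : Int) (s : PySem.Set Int) :
    (PySem.List.pyRange 0 L 1).foldl (fun s off => PySem.Set.add s (start + i * L + off)) s
      = PySem.Set.update s (PySem.List.pyRange (start + i * L) (start + i * L + L) 1) := by
  rw [← pv_map_shift (start + i * L) L, PySem.Set.update_map_eq_foldl_add]

theorem pv_seg (start L : Int) (hL : 0 < L) :
    ∀ (m : Nat) (s : PySem.Set Int),
      (PySem.List.pyRange 0 (m : Int) 1).foldl
          (fun s i => PySem.Set.update s (PySem.List.pyRange (start + i * L) (start + i * L + L) 1)) s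
        = PySem.Set.update s (PySem.List.pyRange start (start + (m : Int) * L) 1) := by
  intro m
  induction m with
  | zero => intro s; simp [PySem.List.pyRange_one_eq_nil, PySem.Set.update_nil]
  | succ m ih =>
    intro s
    have h1 : ((m + 1 : Nat) : Int) = (m : Int) + 1 := by push_cast; ring
    rw [h1, PySem.List.pyRange_one_succ_right (by positivity), List.foldl_append, ih]
    simp only [List.foldl_cons, List.foldl_nil]
    rw [← PySem.Set.update_append]
    rw [← PySem.List.pyRange_one_append start (start + (m : Int) * L) (start + (m : Int) * L + L)
        (by nlinarith) (by omega)]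
    congr 1
    congr 1
    ring

theorem pv_range2 (mi start L : Int) (s : PySem.Set Int) :
    (PySem.List.pyRange 0 mi 1).foldl
        (fun s i => (PySem.List.pyRange 0 L 1).foldl
          (fun s off => PySem.Set.add s (start + i * L + off)) s) s
      = PySem.Set.update s (PySem.List.pyRange start (start + max mi 0 * L) 1) := by
  by_cases hL : 0 < L
  · by_cases hmi : 0 < mi
    · simp only [pv_inner2]
      have hm : mi = (mi.toNat : Int) := by omega
      have hmax : max mi 0 = mi := by omega
      rw [hmax, hm, pv_seg start L hL mi.toNat s]
    · have h1 : PySem.List.pyRange 0 mi 1 = [] := PySem.List.pyRange_one_eq_nil (by omega)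
      have h2 : max mi 0 * L = 0 := by
        have : max mi 0 = 0 := by omega
        simp [this]
      rw [h1, h2, List.foldl_nil]
      simp [PySem.List.pyRange_one_eq_nil, PySem.Set.update_nil]
  · have h1 : PySem.List.pyRange 0 L 1 = [] := PySem.List.pyRange_one_eq_nil (by omega)
    have h2 : start + max mi 0 * L ≤ start := by
      have h3 : max mi 0 * L ≤ 0 := mul_nonpos_of_nonneg_of_nonpos (by omega) (by omega)
      omega
    rw [h1]
    simp only [List.foldl_nil]
    rw [pv_foldl_id _ (fun a b => rfl), PySem.List.pyRange_one_eq_nil h2, PySem.Set.update_nil]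

def pvInv (s : List Int) (ivs : List (Int × Int)) : Prop :=
  s.Nodup ∧ (∀ ab ∈ ivs, ab.1 ≤ ab.2) ∧
    (∀ x : Int, x ∈ s ↔ ∃ ab ∈ ivs, ab.1 ≤ x ∧ x ≤ ab.2)

theorem pv_iloop (start L : Int) (hL : 0 < L) (is_ : List Int) :
    ∀ (s : List Int) (ivs : List (Int × Int)), pvInv s ivs →
      (is_.foldl (fun pu i =>
        let block_start := start + i * L
        let block_end := block_start + L - 1
        let block : PySem.Set Int := PySem.Set.ofList (PySem.List.pyRange block_start (block_end + 1) 1)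
        if PySem.Set.inter block pu.2 = ([] : List Int) then
          (PySem.Set.update pu.1 block, PySem.Set.update pu.2 block)
        else pu) ((s, s) : PySem.Set Int × PySem.Set Int))
      = ((is_.foldl (fun st i =>
            let lo := start + i * L
            let hi := lo + L - 1
            if st.2.any (fun ab => max lo ab.1 ≤ min hi ab.2) then st
            else
              match st.2.getLast? with
              | some ab =>
                if ab.2 = lo - 1 then
                  (st.1 ++ PySem.List.pyRange lo (hi + 1) 1, st.2.dropLast ++ [(ab.1, hi)])
                else (st.1 ++ PySem.List.pyRange lo (hi + 1) 1, st.2 ++ [(lo, hi)])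
              | none => (st.1 ++ PySem.List.pyRange lo (hi + 1) 1, st.2 ++ [(lo, hi)]))
            ((s, ivs) : List Int × List (Int × Int))).1,
         (is_.foldl (fun st i =>
            let lo := start + i * L
            let hi := lo + L - 1
            if st.2.any (fun ab => max lo ab.1 ≤ min hi ab.2) then st
            else
              match st.2.getLast? with
              | some ab =>
                if ab.2 = lo - 1 then
                  (st.1 ++ PySem.List.pyRange lo (hi + 1) 1, st.2.dropLast ++ [(ab.1, hi)])
                else (st.1 ++ PySem.List.pyRange lo (hi + 1) 1, st.2 ++ [(lo, hi)])
              | none => (st.1 ++ PySem.List.pyRange lo (hi + 1) 1, st.2 ++ [(lo, hi)]))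
            ((s, ivs) : List Int × List (Int × Int))).1)
      ∧ pvInv
          (is_.foldl (fun st i =>
            let lo := start + i * L
            let hi := lo + L - 1
            if st.2.any (fun ab => max lo ab.1 ≤ min hi ab.2) then st
            else
              match st.2.getLast? with
              | some ab =>
                if ab.2 = lo - 1 then
                  (st.1 ++ PySem.List.pyRange lo (hi + 1) 1, st.2.dropLast ++ [(ab.1, hi)])
                else (st.1 ++ PySem.List.pyRange lo (hi + 1) 1, st.2 ++ [(lo, hi)])
              | none => (st.1 ++ PySem.List.pyRange lo (hi + 1) 1, st.2 ++ [(lo, hi)]))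
            ((s, ivs) : List Int × List (Int × Int))).1
          (is_.foldl (fun st i =>
            let lo := start + i * L
            let hi := lo + L - 1
            if st.2.any (fun ab => max lo ab.1 ≤ min hi ab.2) then st
            else
              match st.2.getLast? with
              | some ab =>
                if ab.2 = lo - 1 then
                  (st.1 ++ PySem.List.pyRange lo (hi + 1) 1, st.2.dropLast ++ [(ab.1, hi)])
                else (st.1 ++ PySem.List.pyRange lo (hi + 1) 1, st.2 ++ [(lo, hi)])
              | none => (st.1 ++ PySem.List.pyRange lo (hi + 1) 1, st.2 ++ [(lo, hi)]))
            ((s, ivs) : List Int × List (Int × Int))).2 := by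
  induction is_ with
  | nil => intro s ivs h; exact ⟨rfl, h⟩
  | cons i is_ ih =>
    intro s ivs h
    obtain ⟨hnd, hab, hmem⟩ := h
    simp only [List.foldl_cons]
    have hblknd : (PySem.List.pyRange (start + i * L) (start + i * L + L - 1 + 1) 1).Nodup :=
      PySem.List.nodup_pyRange_one _ _
    have hofl : PySem.Set.ofList (PySem.List.pyRange (start + i * L) (start + i * L + L - 1 + 1) 1)
        = PySem.List.pyRange (start + i * L) (start + i * L + L - 1 + 1) 1 :=
      PySem.Set.ofList_eq_self_of_nodup _ hblknd
    have hmemblk : ∀ x : Int,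
        x ∈ PySem.List.pyRange (start + i * L) (start + i * L + L - 1 + 1) 1 ↔
          start + i * L ≤ x ∧ x ≤ start + i * L + L - 1 := by
      intro x
      rw [PySem.List.mem_pyRange_one]
      omega
    by_cases hb : ivs.any (fun ab =>
        decide (max (start + i * L) ab.1 ≤ min (start + i * L + L - 1) ab.2)) = true
    · -- overlap: both sides keep their state
      have hov : ∃ ab ∈ ivs, max (start + i * L) ab.1 ≤ min (start + i * L + L - 1) ab.2 := by
        simpa using hb
      obtain ⟨ab, habm, hle⟩ := hov
      rw [max_le_iff, le_min_iff] at hle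
      have hne : PySem.Set.inter
          (PySem.Set.ofList (PySem.List.pyRange (start + i * L) (start + i * L + L - 1 + 1) 1))
          ((s, s) : PySem.Set Int × PySem.Set Int).2 ≠ ([] : List Int) := by
        rw [hofl]
        intro hnil
        have : max (start + i * L) ab.1 ∈ PySem.Set.inter
            (PySem.List.pyRange (start + i * L) (start + i * L + L - 1 + 1) 1) s := by
          rw [PySem.Set.mem_inter]
          constructor
          · rw [hmemblk]; omega
          · rw [hmem]; exact ⟨ab, habm, by omega⟩
        rw [hnil] at this
        exact absurd this (List.not_mem_nil)
      simp only [if_neg hne, hb, if_pos]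
      exact ih s ivs ⟨hnd, hab, hmem⟩
    · -- no overlap: both sides extend
      have hbf : ∀ ab ∈ ivs, ¬ (max (start + i * L) ab.1 ≤ min (start + i * L + L - 1) ab.2) := by
        simpa using hb
      have hdisj : ∀ x ∈ PySem.List.pyRange (start + i * L) (start + i * L + L - 1 + 1) 1, x ∉ s := by
        intro x hx hxs
        rw [hmemblk] at hx
        rw [hmem] at hxs
        obtain ⟨ab, habm, hax⟩ := hxs
        exact hbf ab habm (by rw [max_le_iff, le_min_iff]; omega)
      have hnil : PySem.Set.inter
          (PySem.Set.ofList (PySem.List.pyRange (start + i * L) (start + i * L + L - 1 + 1) 1))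
          ((s, s) : PySem.Set Int × PySem.Set Int).2 = ([] : List Int) := by
        rw [hofl]
        rw [List.eq_nil_iff_forall_not_mem]
        intro x hx
        rw [PySem.Set.mem_inter] at hx
        exact hdisj x hx.1 hx.2
      have hupd : PySem.Set.update s
          (PySem.Set.ofList (PySem.List.pyRange (start + i * L) (start + i * L + L - 1 + 1) 1))
          = s ++ PySem.List.pyRange (start + i * L) (start + i * L + L - 1 + 1) 1 := by
        rw [hofl]
        exact PySem.Set.update_eq_append_of_disjoint _ _ hblknd hdisj
      have hbB : (ivs.any (fun ab =>
          decide (max (start + i * L) ab.1 ≤ min (start + i * L + L - 1) ab.2))) = false :=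
        Bool.eq_false_iff.mpr hb
      simp only [if_pos hnil, hbB, Bool.false_eq_true, if_false]
      rw [hupd]
      have hndApp : (s ++ PySem.List.pyRange (start + i * L) (start + i * L + L - 1 + 1) 1).Nodup :=
        hnd.append hblknd (fun x hxs hxb => hdisj x hxb hxs)
      have hmemApp : ∀ x : Int,
          x ∈ s ++ PySem.List.pyRange (start + i * L) (start + i * L + L - 1 + 1) 1 ↔
            (∃ ab ∈ ivs, ab.1 ≤ x ∧ x ≤ ab.2) ∨
              (start + i * L ≤ x ∧ x ≤ start + i * L + L - 1) := by
        intro x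
        rw [List.mem_append, hmem, hmemblk]
      have mk_inv : ∀ (ivs' : List (Int × Int)), (∀ ab ∈ ivs', ab.1 ≤ ab.2) →
          (∀ x : Int, (∃ ab ∈ ivs', ab.1 ≤ x ∧ x ≤ ab.2) ↔
            ((∃ ab ∈ ivs, ab.1 ≤ x ∧ x ≤ ab.2) ∨
              (start + i * L ≤ x ∧ x ≤ start + i * L + L - 1))) →
          pvInv (s ++ PySem.List.pyRange (start + i * L) (start + i * L + L - 1 + 1) 1) ivs' :=
        fun ivs' h1 h2 => ⟨hndApp, h1, fun x => (hmemApp x).trans (h2 x).symm⟩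
      have happend : ∀ x : Int,
          (∃ ab ∈ ivs ++ [(start + i * L, start + i * L + L - 1)], ab.1 ≤ x ∧ x ≤ ab.2) ↔
            ((∃ ab ∈ ivs, ab.1 ≤ x ∧ x ≤ ab.2) ∨
              (start + i * L ≤ x ∧ x ≤ start + i * L + L - 1)) := by
        intro x
        constructor
        · rintro ⟨ab, habm, hax⟩
          rcases List.mem_append.mp habm with h1 | h1
          · exact Or.inl ⟨ab, h1, hax⟩
          · simp at h1; subst h1; right; simpa using hax
        · rintro (⟨ab, h1, hax⟩ | hax)
          · exact ⟨ab, List.mem_append_left _ h1, hax⟩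
          · exact ⟨(start + i * L, start + i * L + L - 1),
              List.mem_append_right _ (List.mem_singleton_self _), by simpa using hax⟩
      have happend_le : ∀ ab ∈ ivs ++ [(start + i * L, start + i * L + L - 1)], ab.1 ≤ ab.2 := by
        intro ab habm
        rcases List.mem_append.mp habm with h1 | h1
        · exact hab ab h1
        · simp at h1; subst h1; simp; omega
      cases hlast : ivs.getLast? with
      | none =>
        exact ih _ _ (mk_inv _ happend_le happend)
      | some ab =>
        by_cases hadj : ab.2 = start + i * L - 1
        · simp only [hadj, if_pos]
          have hne' : ivs ≠ [] := by intro hh; rw [hh] at hlast; simp at hlast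
          have hgl : ivs.getLast hne' = ab := by
            rw [List.getLast?_eq_some_getLast hne'] at hlast
            exact Option.some.inj hlast
          have hconcat : ivs.dropLast ++ [ab] = ivs := by
            rw [← hgl]; exact List.dropLast_concat_getLast hne'
          have hsub : ∀ p ∈ ivs.dropLast, p ∈ ivs := by
            intro p hp; rw [← hconcat]; exact List.mem_append_left _ hp
          have habm' : ab ∈ ivs := by
            rw [← hconcat]; exact List.mem_append_right _ (List.mem_singleton_self _)
          have habab : ab.1 ≤ ab.2 := hab ab habm'
          refine ih _ _ (mk_inv _ ?_ ?_)
          · intro p hp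
            rcases List.mem_append.mp hp with h1 | h1
            · exact hab p (hsub p h1)
            · simp at h1; subst h1; simp; omega
          · intro x
            constructor
            · rintro ⟨p, hp, hax⟩
              rcases List.mem_append.mp hp with h1 | h1
              · exact Or.inl ⟨p, hsub p h1, hax⟩
              · simp at h1; subst h1
                simp at hax
                by_cases hx2 : x ≤ ab.2
                · exact Or.inl ⟨ab, habm', ⟨hax.1, hx2⟩⟩
                · right; omega
            · rintro (⟨p, hp, hax⟩ | hax)
              · rw [← hconcat] at hp
                rcases List.mem_append.mp hp with h1 | h1
                · exact ⟨p, List.mem_append_left _ h1, hax⟩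
                · simp at h1; rw [h1] at hax
                  exact ⟨(ab.1, start + i * L + L - 1),
                    List.mem_append_right _ (List.mem_singleton_self _), by simp; omega⟩
              · exact ⟨(ab.1, start + i * L + L - 1),
                  List.mem_append_right _ (List.mem_singleton_self _), by simp; omega⟩
        · simp only [if_neg hadj]
          exact ih _ _ (mk_inv _ happend_le happend)

theorem pv_iloop_trivial (start L : Int) (hL : L ≤ 0) (is_ : List Int)
    (pu : PySem.Set Int × PySem.Set Int) :
    is_.foldl (fun pu i =>
      let block_start := start + i * L
      let block_end := block_start + L - 1
      let block : PySem.Set Int := PySem.Set.ofList (PySem.List.pyRange block_start (block_end + 1) 1)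
      if PySem.Set.inter block pu.2 = ([] : List Int) then
        (PySem.Set.update pu.1 block, PySem.Set.update pu.2 block)
      else pu) pu = pu := by
  apply pv_foldl_id
  intro pu i
  have hnil : PySem.List.pyRange (start + i * L) (start + i * L + L) 1 = [] :=
    PySem.List.pyRange_one_eq_nil (by omega)
  have e : start + i * L + L - 1 + 1 = start + i * L + L := by ring
  simp only [e, hnil, PySem.Set.ofList_nil]
  simp [PySem.Set.inter, PySem.Set.update_nil]

theorem pv_loop1 (m : Int) :
    ∀ (ranges : List (Int × Int)) (s : List Int) (ivs : List (Int × Int)), pvInv s ivs →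
      pvA_loop1 m ranges (s, s) = ((pvB_loop1 m ranges (s, ivs)).1, (pvB_loop1 m ranges (s, ivs)).1)
        ∧ pvInv (pvB_loop1 m ranges (s, ivs)).1 (pvB_loop1 m ranges (s, ivs)).2 := by
  intro ranges
  induction ranges with
  | nil => intro s ivs h; exact ⟨rfl, h⟩
  | cons r rs ih =>
    intro s ivs h
    simp only [pvA_loop1, pvB_loop1, List.foldl_cons]
    by_cases hL : 0 < r.2 - r.1 + 1
    · obtain ⟨heq, hinv⟩ := pv_iloop r.1 (r.2 - r.1 + 1) hL (PySem.List.pyRange 0 m 1) s ivs h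
      rw [if_pos hL, heq]
      have := ih _ _ hinv
      simp only [pvA_loop1, pvB_loop1] at this
      convert this using 3
    · rw [if_neg hL, pv_iloop_trivial r.1 (r.2 - r.1 + 1) (by omega)]
      have := ih s ivs h
      simp only [pvA_loop1, pvB_loop1] at this
      exact this

theorem pv_loop2 (m : Int) (ranges : List (Int × Int)) (s : PySem.Set Int) :
    pvA_loop2 m ranges s = pvB_loop2 m ranges s := by
  unfold pvA_loop2 pvB_loop2
  have hf : (fun (ports : PySem.Set Int) (r : Int × Int) =>
      (PySem.List.pyRange 0 m 1).foldl (fun ports i =>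
        (PySem.List.pyRange 0 (r.2 - r.1 + 1) 1).foldl (fun ports offset =>
          PySem.Set.add ports (r.1 + i * (r.2 - r.1 + 1) + offset)) ports) ports)
      = (fun (result : PySem.Set Int) (r : Int × Int) =>
      PySem.Set.update result
        (PySem.List.pyRange r.1 (r.1 + max m 0 * (r.2 - r.1 + 1)) 1)) := by
    funext s r
    exact pv_range2 m r.1 (r.2 - r.1 + 1) s
  rw [hf]

-- ===== VERDICT (by name: the statement is the Claim_ definition above) =====
theorem expand_instances_per_range_spec : Claim_equal_expand_instances_per_range := by
  intro ranges mi ua _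
  unfold Spec_expand_instances_per_range
  simp only [expand_instances_per_range, expand_instances_per_range_alt]
  have h0 : pvInv ([] : List Int) ([] : List (Int × Int)) := ⟨List.nodup_nil, by simp, by simp⟩
  obtain ⟨heq, hinv⟩ := pv_loop1 mi ranges [] [] h0
  have hemp : ((PySem.Set.empty, PySem.Set.empty) : PySem.Set Int × PySem.Set Int)
      = (([] : List Int), ([] : List Int)) := rfl
  rw [hemp, heq, PySem.Set.ofList_eq_self_of_nodup _ hinv.1]
  cases ua
  · simp
  · simp [pv_loop2]
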